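-- pv_equiv track=rewrite | github.com/posl/comment_recommendation | script/split_gen/3_time/zh/246_C/0.py | solve
-- ===== SOURCE A (Python) =====
-- def solve(n, k, x, a):
--     a.sort()
--     ans = 0
--     for i in range(n):
--         if k > 0:
--             ans += max(a[i] - x, 0)
--             k -= 1
--         else:
--             ans += a[i]
--     return ans
-- ===== SOURCE B (Python) =====
-- def solve(n, k, x, a):
--     # Return-value equivalent to A (A also sorts `a` in place; B leaves `a` untouched).
--     kk = k if k < n else n
--     if kk < 0:
--         kk = 0
--     sel = _k_smallest(a, n)          # the n smallest values: all A ever sums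
--     return sum(sel) - sum(v if v < x else x for v in _k_smallest(sel, kk))
--
--
-- def _k_smallest(a, k):
--     # some permutation of the k smallest elements of a (all of a if k >= len(a)),
--     # by three-way-partition quickselect (average O(len(a)))
--     if k <= 0:
--         return []
--     if k >= len(a):
--         return list(a)
--     p = a[len(a) // 2]
--     lt = [v for v in a if v < p]
--     eq = [v for v in a if v == p]
--     gt = [v for v in a if v > p]
--     if k <= len(lt):
--         return _k_smallest(lt, k)
--     if k <= len(lt) + len(eq):
--         return lt + eq[:k - len(lt)]
--     return lt + eq + _k_smallest(gt, k - len(lt) - len(eq))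
-- ===== Notes on version B (the rewrite author's own statement) =====
-- stated objective: alternative
-- what changed: replaces sort + per-element counting loop by a three-way-partition quickselect extracting the n (then k) smallest elements and a closed-form sum-minus-discount; B also leaves the input list unmutated where A sorts it in place
import Mathlib
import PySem

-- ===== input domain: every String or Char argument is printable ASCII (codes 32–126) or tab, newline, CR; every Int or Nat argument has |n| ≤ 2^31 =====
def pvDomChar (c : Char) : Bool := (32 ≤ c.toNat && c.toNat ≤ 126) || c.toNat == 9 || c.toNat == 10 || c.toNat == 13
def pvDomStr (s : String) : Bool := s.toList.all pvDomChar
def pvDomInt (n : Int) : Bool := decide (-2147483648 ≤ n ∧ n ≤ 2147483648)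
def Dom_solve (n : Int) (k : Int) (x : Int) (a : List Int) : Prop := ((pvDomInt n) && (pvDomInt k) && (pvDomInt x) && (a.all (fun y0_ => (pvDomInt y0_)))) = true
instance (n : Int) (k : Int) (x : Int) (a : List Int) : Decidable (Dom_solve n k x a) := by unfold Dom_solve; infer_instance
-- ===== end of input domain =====

-- B replaces A's sort + counting loop by quickselect of the n (then k) smallest and a closed
-- sum-minus-discount formula; equivalence is about the RETURN value only (A sorts `a` in place, B does not).

-- ===== PORT A =====
-- A: a.sort(); ans = 0; for i in range(n): if k > 0: ans += max(a[i]-x,0); k -= 1 else: ans += a[i]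
def solve (n : Int) (k : Int) (x : Int) (a : List Int) : Int :=
  let s := PySem.List.sorted a (fun v => v) false
  ((PySem.List.pyRange 0 n 1).foldl
    (fun (st : Int × Int) i =>
      if st.2 > 0 then (st.1 + max (PySem.List.pyGetD s i 0 - x) 0, st.2 - 1)
      else (st.1 + PySem.List.pyGetD s i 0, st.2))
    (0, k)).1

-- ===== PORT B =====
-- _k_smallest, ported with a structural fuel = length of the list (the Python recursion always
-- descends to a strictly shorter partition, so fuel = a.length suffices; kSmallest applies it).
def kSmallestF (fuel : Nat) (a : List Int) (k : Int) : List Int :=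
  match fuel with
  | 0 => []
  | fuel + 1 =>
    if k ≤ 0 then []
    else if (a.length : Int) ≤ k then a
    else
      let p := PySem.List.pyGetD a (PySem.Int.floordiv (a.length : Int) 2) 0
      let lt := a.filter (fun v => v < p)
      let eq := a.filter (fun v => v == p)
      let gt := a.filter (fun v => p < v)
      if k ≤ (lt.length : Int) then kSmallestF fuel lt k
      else if k ≤ (lt.length : Int) + (eq.length : Int) then
        lt ++ PySem.List.slice eq none (some (k - (lt.length : Int)))
      else lt ++ eq ++ kSmallestF fuel gt (k - (lt.length : Int) - (eq.length : Int))

def kSmallest (a : List Int) (k : Int) : List Int := kSmallestF a.length a k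

def solve_alt (n : Int) (k : Int) (x : Int) (a : List Int) : Int :=
  let kk := if k < n then k else n
  let kk := if kk < 0 then 0 else kk
  let sel := kSmallest a n
  sel.sum - ((kSmallest sel kk).map (fun v => if v < x then v else x)).sum

-- ===== PRECONDITION & SPEC =====
-- Pre_ excludes exactly the inputs where A raises IndexError (n larger than len(a)); A returns on all others.
def Pre_solve (n : Int) (k : Int) (x : Int) (a : List Int) : Prop := n ≤ (a.length : Int)
instance (n : Int) (k : Int) (x : Int) (a : List Int) : Decidable (Pre_solve n k x a) := by unfold Pre_solve; infer_instance

def pvWitness_solve : Int × Int × Int × List Int := (3, 1, 2, [5, 1, 4])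

def Spec_solve (n : Int) (k : Int) (x : Int) (a : List Int) (out : Int) : Prop := out = solve_alt n k x a
instance (n : Int) (k : Int) (x : Int) (a : List Int) (out : Int) : Decidable (Spec_solve n k x a out) := by unfold Spec_solve; infer_instance

-- ===== CLAIM (what is proved, stated in full; the proofs are below) =====
def Claim_equal_solve : Prop := ∀ (n : Int) (k : Int) (x : Int) (a : List Int), Dom_solve n k x a → Pre_solve n k x a → Spec_solve n k x a (solve n k x a)

-- ===== LEMMAS AND PROOFS =====

theorem pv_loop_eval (x : Int) (t : List Int) : ∀ (k ans : Int),
    (t.foldl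
      (fun (st : Int × Int) v =>
        if st.2 > 0 then (st.1 + max (v - x) 0, st.2 - 1) else (st.1 + v, st.2))
      (ans, k)).1
    = ans + t.sum - ((t.take k.toNat).map (fun v => if v < x then v else x)).sum := by
  induction t with
  | nil => intro k ans; simp
  | cons v t ih =>
    intro k ans
    by_cases hk : k > 0
    · have hkn : k.toNat = (k - 1).toNat + 1 := by omega
      rw [List.foldl_cons, if_pos hk, ih (k - 1), hkn, List.take_succ_cons, List.map_cons,
        List.sum_cons, List.sum_cons]
      by_cases hvx : v < x <;> simp only [hvx, if_true, if_false, max_def] <;> split_ifs <;> omega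
    · have hkn : k.toNat = 0 := by omega
      rw [List.foldl_cons, if_neg hk, ih k, hkn]
      simp only [List.take_zero, List.map_nil, List.sum_nil, List.sum_cons]
      omega

theorem pv_sorted_split (a : List Int) (p : Int) :
    PySem.List.sorted a (fun v => v) false =
      PySem.List.sorted (a.filter (fun v => v < p)) (fun v => v) false
        ++ a.filter (fun v => v == p)
        ++ PySem.List.sorted (a.filter (fun v => p < v)) (fun v => v) false := by
  apply PySem.List.sorted_id_eq_of_perm_of_pairwise
  · -- permutation with a
    have h1 : (a.filter (fun v => v == p) ++ a.filter (fun v => p < v)).Perm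
        (a.filter (fun v => !(decide (v < p)))) := by
      have hq := List.filter_append_perm (fun v => v == p) (a.filter (fun v => !(decide (v < p))))
      rw [List.filter_filter, List.filter_filter] at hq
      have e1 : (fun v => (v == p) && !(decide (v < p))) = (fun v : Int => v == p) := by
        funext v; by_cases h : v = p <;> simp [h]
      have e2 : (fun v => (!(v == p)) && !(decide (v < p))) = (fun v : Int => decide (p < v)) := by
        funext v
        rcases lt_trichotomy v p with h | h | h
        · simp [h, not_lt_of_gt]
        · simp [h]
        · simp [h, ne_of_gt h, not_lt.2 (le_of_lt h)]
      rw [e1, e2] at hq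
      exact hq
    have s1 : (PySem.List.sorted (a.filter (fun v => v < p)) (fun v => v) false
          ++ a.filter (fun v => v == p)
          ++ PySem.List.sorted (a.filter (fun v => p < v)) (fun v => v) false).Perm
        (a.filter (fun v => v < p)
          ++ (a.filter (fun v => v == p) ++ a.filter (fun v => p < v))) := by
      rw [List.append_assoc]
      exact List.Perm.append (PySem.List.sorted_perm _ _ _)
        (List.Perm.append_left _ (PySem.List.sorted_perm _ _ _))
    have s2 := (List.Perm.append_left (a.filter (fun v => v < p)) h1)
    have s3 : ((a.filter (fun v => v < p)) ++ a.filter (fun v => !(decide (v < p)))).Perm a := by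
      have := List.filter_append_perm (fun v => decide (v < p)) a
      simpa using this
    exact (s1.trans s2).trans s3
  · -- pairwise ≤
    rw [List.pairwise_append]
    refine ⟨?_, PySem.List.sorted_pairwise _ _, ?_⟩
    · rw [List.pairwise_append]
      refine ⟨PySem.List.sorted_pairwise _ _, ?_, ?_⟩
      · refine List.pairwise_iff_forall_sublist.2 ?_
        intro u v h
        have hu := h.subset
        have h1 : u ∈ a.filter (fun v => v == p) := hu (by simp)
        have h2 : v ∈ a.filter (fun v => v == p) := hu (by simp)
        simp only [List.mem_filter, beq_iff_eq] at h1 h2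
        omega
      · intro u hu v hv
        have hu' : u ∈ a.filter (fun w => decide (w < p)) := (PySem.List.mem_sorted _ _ _ _).1 hu
        simp only [List.mem_filter, decide_eq_true_eq, beq_iff_eq] at hu' hv
        omega
    · intro u hu v hv
      have hv' : v ∈ a.filter (fun w => decide (p < w)) := (PySem.List.mem_sorted _ _ _ _).1 hv
      simp only [List.mem_append] at hu
      rcases hu with hu | hu
      · have hu' : u ∈ a.filter (fun w => decide (w < p)) := (PySem.List.mem_sorted _ _ _ _).1 hu
        simp only [List.mem_filter, decide_eq_true_eq] at hu' hv'
        omega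
      · simp only [List.mem_filter, decide_eq_true_eq, beq_iff_eq] at hu hv'
        omega

theorem pv_kSmallestF_perm : ∀ (fuel : Nat) (a : List Int) (k : Int), a.length ≤ fuel →
    (kSmallestF fuel a k).Perm ((PySem.List.sorted a (fun v => v) false).take k.toNat) := by
  intro fuel
  induction fuel with
  | zero =>
    intro a k h
    have : a = [] := List.eq_nil_of_length_eq_zero (Nat.le_zero.1 h)
    subst this
    simp [kSmallestF, PySem.List.sorted]
  | succ fuel ih =>
    intro a k h
    rw [kSmallestF]
    by_cases hk0 : k ≤ 0
    · rw [if_pos hk0]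
      have : k.toNat = 0 := by omega
      simp [this]
    · rw [if_neg hk0]
      by_cases hlen : (a.length : Int) ≤ k
      · rw [if_pos hlen]
        have hlen2 : (PySem.List.sorted a (fun v => v) false).length ≤ k.toNat := by
          rw [PySem.List.length_sorted]; omega
        rw [List.take_of_length_le hlen2]
        exact (PySem.List.sorted_perm _ _ _).symm
      · rw [if_neg hlen]
        set p := PySem.List.pyGetD a (PySem.Int.floordiv (a.length : Int) 2) 0 with hp
        set lt := a.filter (fun v => v < p) with hlt
        set eq := a.filter (fun v => v == p) with heq
        set gt := a.filter (fun v => p < v) with hgt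
        -- p is an element of a
        have hne : 0 < a.length := by omega
        have hpmem : p ∈ a := by
          apply PySem.List.pyGetD_mem
          constructor
          · simp only [PySem.Int.floordiv]; rw [Int.fdiv_eq_ediv]; simp; omega
          · simp only [PySem.Int.floordiv]; rw [Int.fdiv_eq_ediv]; simp; omega
        have hplt : p ∉ lt := by simp [hlt]
        have hpgt : p ∉ gt := by simp [hgt]
        have hltlen : lt.length < a.length := by
          have h1 := List.length_eq_length_filter_add (l := a) (fun v => decide (v < p))
          have h2 : p ∈ a.filter (fun v => !(decide (v < p))) := by
            simp [List.mem_filter, hpmem]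
          have := List.length_pos_of_mem h2
          simp only [hlt]; omega
        have hgtlen : gt.length < a.length := by
          have h1 := List.length_eq_length_filter_add (l := a) (fun v => decide (p < v))
          have h2 : p ∈ a.filter (fun v => !(decide (p < v))) := by
            simp [List.mem_filter, hpmem]
          have := List.length_pos_of_mem h2
          simp only [hgt]; omega
        have hsplit := pv_sorted_split a p
        rw [← hlt, ← heq, ← hgt] at hsplit
        have hsl : (PySem.List.sorted lt (fun v => v) false).length = lt.length :=
          PySem.List.length_sorted _ _ _
        by_cases c1 : k ≤ (lt.length : Int)
        · rw [if_pos c1, hsplit, List.append_assoc, List.take_append]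
          have h0 : k.toNat - (PySem.List.sorted lt (fun v => v) false).length = 0 := by
            rw [hsl]; omega
          rw [h0, List.take_zero, List.append_nil]
          exact ih lt k (by omega)
        · rw [if_neg c1]
          by_cases c2 : k ≤ (lt.length : Int) + (eq.length : Int)
          · rw [if_pos c2, hsplit, List.append_assoc, List.take_append]
            have h1 : (PySem.List.sorted lt (fun v => v) false).take k.toNat
                = PySem.List.sorted lt (fun v => v) false :=
              List.take_of_length_le (by rw [hsl]; omega)
            rw [h1, List.take_append]
            have h2 : k.toNat - (PySem.List.sorted lt (fun v => v) false).length - eq.length = 0 := by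
              rw [hsl]; omega
            rw [h2, List.take_zero, List.append_nil]
            -- slice eq none (some (k - lt.length)) = eq.take (k.toNat - lt.length)
            have hm : k - (lt.length : Int) = (((k.toNat - lt.length : Nat) : Int)) := by omega
            rw [hm, PySem.List.slice_to_natCast, hsl]
            exact List.Perm.append_right _ (PySem.List.sorted_perm _ _ _).symm
          · rw [if_neg c2, hsplit, List.take_append]
            have h1 : (PySem.List.sorted lt (fun v => v) false ++ eq).take k.toNat
                = PySem.List.sorted lt (fun v => v) false ++ eq :=
              List.take_of_length_le (by simp only [List.length_append, hsl]; omega)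
            rw [h1]
            have h3 : (k - (lt.length : Int) - (eq.length : Int)).toNat
                = k.toNat - (PySem.List.sorted lt (fun v => v) false ++ eq).length := by
              simp only [List.length_append, hsl]; omega
            rw [← h3]
            exact List.Perm.append
              (List.Perm.append_right _ (PySem.List.sorted_perm _ _ _).symm) (ih gt _ (by omega))

theorem pv_kSmallest_perm (a : List Int) (k : Int) :
    (kSmallest a k).Perm ((PySem.List.sorted a (fun v => v) false).take k.toNat) :=
  pv_kSmallestF_perm a.length a k le_rfl

-- closed form for port A under the precondition
theorem pv_solve_closed (n k x : Int) (a : List Int) (hpre : n ≤ (a.length : Int)) :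
    solve n k x a =
      ((PySem.List.sorted a (fun v => v) false).take n.toNat).sum
        - ((((PySem.List.sorted a (fun v => v) false).take n.toNat).take k.toNat).map
            (fun v => if v < x then v else x)).sum := by
  have hslen : (PySem.List.sorted a (fun v => v) false).length = a.length :=
    PySem.List.length_sorted _ _ _
  rw [solve]
  by_cases hn : n ≤ 0
  · have h0 : n.toNat = 0 := by omega
    rw [PySem.List.pyRange_one_eq_nil hn, h0]
    simp
  · set s := PySem.List.sorted a (fun v => v) false with hs
    set t := s.take n.toNat with ht
    have htlen : (t.length : Int) = n := by
      rw [ht, List.length_take, hslen]; omega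
    have hcongr : (PySem.List.pyRange 0 n 1).foldl
        (fun (st : Int × Int) i =>
          if st.2 > 0 then (st.1 + max (PySem.List.pyGetD s i 0 - x) 0, st.2 - 1)
          else (st.1 + PySem.List.pyGetD s i 0, st.2)) (0, k)
        = (PySem.List.pyRange 0 n 1).foldl
        (fun (st : Int × Int) i =>
          (fun (st : Int × Int) v =>
            if st.2 > 0 then (st.1 + max (v - x) 0, st.2 - 1) else (st.1 + v, st.2))
            st (PySem.List.pyGetD t i 0)) (0, k) := by
      apply PySem.List.foldl_congr_mem
      intro acc i hi
      have hib := (PySem.List.mem_pyRange_one).1 hi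
      have hgd : PySem.List.pyGetD s i 0 = PySem.List.pyGetD t i 0 := by
        rw [PySem.List.pyGetD_eq_getElem s 0 (by omega) (by omega),
            PySem.List.pyGetD_eq_getElem t 0 (by omega) (by omega), List.getElem_take]
      simp only [hgd]
    rw [hcongr, ← htlen,
      PySem.List.foldl_pyRange_zero_pyGetD' t 0
        (fun (st : Int × Int) v =>
          if st.2 > 0 then (st.1 + max (v - x) 0, st.2 - 1) else (st.1 + v, st.2)) (0, k),
      pv_loop_eval]
    ring

-- ===== VERDICT (by name: the statement is the Claim_ definition above) =====
theorem solve_spec : Claim_equal_solve := by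
  intro n k x a _ hpre
  unfold Spec_solve
  unfold Pre_solve at hpre
  set s := PySem.List.sorted a (fun v => v) false with hs
  set t := s.take n.toNat with ht
  have hslen : s.length = a.length := PySem.List.length_sorted _ _ _
  rw [pv_solve_closed n k x a hpre, solve_alt]
  set kk1 := if k < n then k else n with hkk1
  set kk2 := if kk1 < 0 then 0 else kk1 with hkk2
  have hsel : (kSmallest a n).Perm t := pv_kSmallest_perm a n
  have hsum : (kSmallest a n).sum = t.sum := hsel.sum_eq
  have htpw : t.Pairwise (fun u v : Int => u ≤ v) := by
    have := PySem.List.sorted_pairwise (key := fun v : Int => v) a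
    exact List.Pairwise.sublist (List.take_sublist _ _) this
  have hsorted : PySem.List.sorted (kSmallest a n) (fun v => v) false = t :=
    PySem.List.sorted_id_eq_of_perm_of_pairwise _ _ hsel.symm htpw
  have h2 : (kSmallest (kSmallest a n) kk2).Perm (t.take kk2.toNat) := by
    have h := pv_kSmallest_perm (kSmallest a n) kk2
    rwa [hsorted] at h
  have h3 : t.take kk2.toNat = t.take k.toNat := by
    rw [ht, List.take_take, List.take_take]
    congr 1
    rw [hkk2, hkk1]
    split_ifs <;> omega
  rw [h3] at h2
  have h4 : ((kSmallest (kSmallest a n) kk2).map (fun v => if v < x then v else x)).sum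
      = ((t.take k.toNat).map (fun v => if v < x then v else x)).sum :=
    (h2.map _).sum_eq
  rw [hsum, h4]
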